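-- pv_equiv track=rewrite | github.com/lemphis/algorithm | 백준/Bronze/1942. 디지털시계/디지털시계.py | count_div3
-- ===== SOURCE A (Python) =====
-- def clock_number(h, m, s):
--     return int(f"{h:02}{m:02}{s:02}")
--
-- def count_div3(start, end):
--     count = 0
--     if start <= end:
--         t = start
--         while t <= end:
--             h = (t // 3600) % 24
--             m = (t % 3600) // 60
--             s = t % 60
--             if clock_number(h, m, s) % 3 == 0:
--                 count += 1
--             t += 1
--     else:
--         t = start
--         while t < 24 * 3600:
--             h = (t // 3600) % 24
--             m = (t % 3600) // 60
--             s = t % 60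
--             if clock_number(h, m, s) % 3 == 0:
--                 count += 1
--             t += 1
--         t = 0
--         while t <= end:
--             h = (t // 3600) % 24
--             m = (t % 3600) // 60
--             s = t % 60
--             if clock_number(h, m, s) % 3 == 0:
--                 count += 1
--             t += 1
--     return count
-- ===== SOURCE B (Python) =====
-- def _G(n):
--     # signed prefix count: for n >= 0, number of t in [0, n) whose clock number is divisible by 3
--     d, r = divmod(n, 86400)
--     hq, r2 = divmod(r, 3600)
--     mq, s = divmod(r2, 60)
--     need = -(hq + mq) % 3
--     return d * 28800 + hq * 1200 + mq * 20 + (s - need + 2) // 3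
--
-- def _count(a, b):
--     # number of t in [a, b) whose clock number is divisible by 3
--     return _G(b) - _G(a) if a < b else 0
--
-- def count_div3(start, end):
--     if start <= end:
--         return _count(start, end + 1)
--     return _count(start, 24 * 3600) + _count(0, end + 1)
-- ===== Notes on version B (the rewrite author's own statement) =====
-- stated objective: faster
-- what changed: A scans every second in the range and parses the formatted clock string each time; B uses the fact that the clock number is divisible by 3 iff h+m+s is, and evaluates a closed-form prefix counter (full days/hours/minutes plus a 3-residue count for the partial minute) in O(1).
import Mathlib
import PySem

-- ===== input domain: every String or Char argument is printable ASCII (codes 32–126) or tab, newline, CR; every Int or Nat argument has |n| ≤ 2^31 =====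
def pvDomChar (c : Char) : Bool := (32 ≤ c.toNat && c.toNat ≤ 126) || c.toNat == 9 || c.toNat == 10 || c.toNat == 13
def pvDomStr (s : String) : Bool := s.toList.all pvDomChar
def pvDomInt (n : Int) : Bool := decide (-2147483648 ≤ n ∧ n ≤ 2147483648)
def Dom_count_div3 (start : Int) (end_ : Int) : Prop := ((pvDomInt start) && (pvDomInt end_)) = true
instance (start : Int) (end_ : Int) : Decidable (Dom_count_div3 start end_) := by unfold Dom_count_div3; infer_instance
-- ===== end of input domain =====

-- B replaces A's second-by-second scan with an O(1) closed-form prefix counter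
-- (clock number % 3 == digit sum % 3), so B is asymptotically faster.

-- ===== PORT A =====
-- f"{x:02}" (exact for the values A feeds it: str(x) with a '0' prepended when one char)
def fmt02 (x : Int) : List Char :=
  let s := PySem.Int.toChars x
  if s.length < 2 then '0' :: s else s

-- hand port of int(digit-string): exact on nonempty all-ASCII-digit strings,
-- which are the only strings clock_number ever builds (h, m, s are always in [0, 60))
def pyIntDigits (cs : List Char) : Int :=
  Int.ofNat (cs.foldl (fun acc c => acc * 10 + (c.toNat - 48)) 0)

-- int(f"{h:02}{m:02}{s:02}")
def clock_number (h : Int) (m : Int) (s : Int) : Int :=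
  pyIntDigits (fmt02 h ++ fmt02 m ++ fmt02 s)

-- while t <= end: body of A's first (and third) loop
def loopLeA (t : Int) (end_ : Int) (count : Int) : Int :=
  if _h : t ≤ end_ then
    let h := PySem.Int.mod (PySem.Int.floordiv t 3600) 24
    let m := PySem.Int.floordiv (PySem.Int.mod t 3600) 60
    let s := PySem.Int.mod t 60
    loopLeA (t + 1) end_ (if PySem.Int.mod (clock_number h m s) 3 = 0 then count + 1 else count)
  else count
termination_by (end_ + 1 - t).toNat
decreasing_by omega

-- while t < 24 * 3600: body of A's second loop
def loopLtA (t : Int) (count : Int) : Int :=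
  if _h : t < 24 * 3600 then
    let h := PySem.Int.mod (PySem.Int.floordiv t 3600) 24
    let m := PySem.Int.floordiv (PySem.Int.mod t 3600) 60
    let s := PySem.Int.mod t 60
    loopLtA (t + 1) (if PySem.Int.mod (clock_number h m s) 3 = 0 then count + 1 else count)
  else count
termination_by (24 * 3600 - t).toNat
decreasing_by omega

def count_div3 (start : Int) (end_ : Int) : Int :=
  if start ≤ end_ then loopLeA start end_ 0
  else loopLeA 0 end_ (loopLtA start 0)

-- ===== PORT B =====
-- signed prefix count: for n >= 0, number of t in [0, n) whose clock number is divisible by 3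
def prefixG (n : Int) : Int :=
  let d := PySem.Int.floordiv n 86400
  let r := PySem.Int.mod n 86400
  let hq := PySem.Int.floordiv r 3600
  let r2 := PySem.Int.mod r 3600
  let mq := PySem.Int.floordiv r2 60
  let s := PySem.Int.mod r2 60
  let need := PySem.Int.mod (-(hq + mq)) 3
  d * 28800 + hq * 1200 + mq * 20 + PySem.Int.floordiv (s - need + 2) 3

-- number of t in [a, b) whose clock number is divisible by 3
def cntRange (a : Int) (b : Int) : Int :=
  if a < b then prefixG b - prefixG a else 0

def count_div3_alt (start : Int) (end_ : Int) : Int :=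
  if start ≤ end_ then cntRange start (end_ + 1)
  else cntRange start (24 * 3600) + cntRange 0 (end_ + 1)

-- ===== PRECONDITION & SPEC =====
def Spec_count_div3 (start : Int) (end_ : Int) (out : Int) : Prop := out = count_div3_alt start end_
instance (start : Int) (end_ : Int) (out : Int) : Decidable (Spec_count_div3 start end_ out) := by unfold Spec_count_div3; infer_instance

-- ===== CLAIM (what is proved, stated in full; the proofs are below) =====
def Claim_equal_count_div3 : Prop := ∀ (start : Int) (end_ : Int), Dom_count_div3 start end_ → Spec_count_div3 start end_ (count_div3 start end_)

-- ===== LEMMAS AND PROOFS =====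

-- f"{x:02}" for 0 <= x < 60 is the two decimal digit characters of x
theorem fmt02_digits : ∀ x : Nat, x < 60 →
    fmt02 (x : Int) = [Nat.digitChar (x / 10), Nat.digitChar (x % 10)] := by decide

theorem digitChar_val : ∀ d : Nat, d < 10 → (Nat.digitChar d).toNat - 48 = d := by decide

-- folding the parser over one two-digit block adds the block's value
theorem foldl_fmt02 (x : Nat) (hx : x < 60) (acc : Nat) :
    List.foldl (fun acc c => acc * 10 + (c.toNat - 48)) acc (fmt02 (x : Int))
      = acc * 100 + x := by
  rw [fmt02_digits x hx]
  simp only [List.foldl_cons, List.foldl_nil]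
  rw [digitChar_val (x / 10) (by omega), digitChar_val (x % 10) (by omega)]
  omega

-- the clock number A parses out of the formatted string is just the positional value
theorem clock_eq : ∀ h : Nat, h < 24 → ∀ m : Nat, m < 60 → ∀ s : Nat, s < 60 →
    clock_number h m s = (h : Int) * 10000 + (m : Int) * 100 + (s : Int) := by
  intro h hh m hm s hs
  unfold clock_number pyIntDigits
  rw [List.foldl_append, List.foldl_append,
    foldl_fmt02 h (by omega) 0, foldl_fmt02 m hm, foldl_fmt02 s hs]
  rw [Int.ofNat_eq_natCast]
  push_cast
  ring

-- the 0/1 increment A's loop body adds at second t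
def chi (t : Int) : Int :=
  if PySem.Int.mod (clock_number (PySem.Int.mod (PySem.Int.floordiv t 3600) 24)
      (PySem.Int.floordiv (PySem.Int.mod t 3600) 60) (PySem.Int.mod t 60)) 3 = 0 then 1 else 0

theorem chi_eq_dvd (t : Int) :
    chi t = if 3 ∣ (t / 3600 % 24 + t % 3600 / 60 + t % 60) then 1 else 0 := by
  have hm : PySem.Int.mod (PySem.Int.floordiv t 3600) 24 = t / 3600 % 24 := by
    rw [PySem.Int.floordiv_eq_ediv_of_pos (by norm_num), PySem.Int.mod_eq_emod_of_pos (by norm_num)]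
  have hmm : PySem.Int.floordiv (PySem.Int.mod t 3600) 60 = t % 3600 / 60 := by
    rw [PySem.Int.mod_eq_emod_of_pos (by norm_num), PySem.Int.floordiv_eq_ediv_of_pos (by norm_num)]
  have hss : PySem.Int.mod t 60 = t % 60 := PySem.Int.mod_eq_emod_of_pos (by norm_num)
  have hb1 : 0 ≤ t / 3600 % 24 ∧ t / 3600 % 24 < 24 := by constructor <;> omega
  have hb2 : 0 ≤ t % 3600 / 60 ∧ t % 3600 / 60 < 60 := by constructor <;> omega
  have hb3 : 0 ≤ t % 60 ∧ t % 60 < 60 := by constructor <;> omega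
  have hcn : clock_number (t / 3600 % 24) (t % 3600 / 60) (t % 60)
      = (t / 3600 % 24) * 10000 + (t % 3600 / 60) * 100 + (t % 60) := by
    have := clock_eq (t / 3600 % 24).toNat (by omega) (t % 3600 / 60).toNat (by omega)
      (t % 60).toNat (by omega)
    simpa [Int.toNat_of_nonneg hb1.1, Int.toNat_of_nonneg hb2.1, Int.toNat_of_nonneg hb3.1] using this
  have hiff : (3 ∣ (t / 3600 % 24) * 10000 + (t % 3600 / 60) * 100 + (t % 60))
      ↔ (3 ∣ t / 3600 % 24 + t % 3600 / 60 + t % 60) := by omega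
  unfold chi
  simp only [hm, hmm, hss, hcn, PySem.Int.mod_eq_zero_iff_dvd, hiff]

-- chi at a decomposed second n = 86400 d + 3600 hq + 60 mq + s
theorem chi_val (n d hq mq s : Int) (h1 : n = 86400 * d + 3600 * hq + 60 * mq + s)
    (hb : 0 ≤ hq ∧ hq < 24 ∧ 0 ≤ mq ∧ mq < 60 ∧ 0 ≤ s ∧ s < 60) :
    chi n = if 3 ∣ (hq + mq + s) then 1 else 0 := by
  rw [chi_eq_dvd]
  have c1 : n / 3600 % 24 = hq := by omega
  have c2 : n % 3600 / 60 = mq := by omega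
  have c3 : n % 60 = s := by omega
  rw [c1, c2, c3]

-- closed form of the prefix counter at a decomposed argument
theorem prefixG_val (n d hq mq s : Int) (h1 : n = 86400 * d + 3600 * hq + 60 * mq + s)
    (hb : 0 ≤ hq ∧ hq < 24 ∧ 0 ≤ mq ∧ mq < 60 ∧ 0 ≤ s ∧ s < 60) :
    prefixG n = d * 28800 + hq * 1200 + mq * 20 + (s - -(hq + mq) % 3 + 2) / 3 := by
  unfold prefixG
  simp only [PySem.Int.floordiv_eq_ediv_of_pos (b := 86400) (by norm_num),
    PySem.Int.mod_eq_emod_of_pos (b := 86400) (by norm_num),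
    PySem.Int.floordiv_eq_ediv_of_pos (b := 3600) (by norm_num),
    PySem.Int.mod_eq_emod_of_pos (b := 3600) (by norm_num),
    PySem.Int.floordiv_eq_ediv_of_pos (b := 60) (by norm_num),
    PySem.Int.mod_eq_emod_of_pos (b := 60) (by norm_num),
    PySem.Int.floordiv_eq_ediv_of_pos (b := 3) (by norm_num),
    PySem.Int.mod_eq_emod_of_pos (b := 3) (by norm_num)]
  have e1 : n / 86400 = d := by omega
  have e2 : n % 86400 = 3600 * hq + 60 * mq + s := by omega
  rw [e1, e2]
  have e3 : (3600 * hq + 60 * mq + s) / 3600 = hq := by omega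
  have e4 : (3600 * hq + 60 * mq + s) % 3600 = 60 * mq + s := by omega
  rw [e3, e4]
  have e5 : (60 * mq + s) / 60 = mq := by omega
  have e6 : (60 * mq + s) % 60 = s := by omega
  rw [e5, e6]

-- one step of the prefix counter
theorem prefixG_step (n : Int) : prefixG (n + 1) = prefixG n + chi n := by
  obtain ⟨d, hq, mq, s, h1, hb⟩ :
      ∃ d hq mq s : Int, n = 86400 * d + 3600 * hq + 60 * mq + s ∧
        (0 ≤ hq ∧ hq < 24 ∧ 0 ≤ mq ∧ mq < 60 ∧ 0 ≤ s ∧ s < 60) :=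
    ⟨n / 86400, n % 86400 / 3600, n % 3600 / 60, n % 60, by omega, by omega⟩
  rw [chi_val n d hq mq s h1 hb, prefixG_val n d hq mq s h1 hb]
  by_cases hs : s < 59
  · rw [prefixG_val (n + 1) d hq mq (s + 1) (by omega) (by omega)]
    split_ifs <;> omega
  · by_cases hmq : mq < 59
    · rw [prefixG_val (n + 1) d hq (mq + 1) 0 (by omega) (by omega)]
      split_ifs <;> omega
    · by_cases hhq : hq < 23
      · rw [prefixG_val (n + 1) d (hq + 1) 0 0 (by omega) (by omega)]
        split_ifs <;> omega
      · rw [prefixG_val (n + 1) (d + 1) 0 0 0 (by omega) (by omega)]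
        split_ifs <;> omega

-- one unfolding step of A's first/third loop
theorem loopLeA_unfold (t e count : Int) :
    loopLeA t e count = if t ≤ e then loopLeA (t + 1) e (count + chi t) else count := by
  rw [loopLeA]
  unfold chi
  by_cases h : t ≤ e
  · rw [dif_pos h, if_pos h]
    by_cases hc : PySem.Int.mod (clock_number (PySem.Int.mod (PySem.Int.floordiv t 3600) 24)
        (PySem.Int.floordiv (PySem.Int.mod t 3600) 60) (PySem.Int.mod t 60)) 3 = 0
    · simp only [hc, if_pos]
    · simp only [hc, if_false]
      simp
  · rw [dif_neg h, if_neg h]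

-- one unfolding step of A's second loop
theorem loopLtA_unfold (t count : Int) :
    loopLtA t count = if t < 24 * 3600 then loopLtA (t + 1) (count + chi t) else count := by
  rw [loopLtA]
  unfold chi
  by_cases h : t < 24 * 3600
  · rw [dif_pos h, if_pos h]
    by_cases hc : PySem.Int.mod (clock_number (PySem.Int.mod (PySem.Int.floordiv t 3600) 24)
        (PySem.Int.floordiv (PySem.Int.mod t 3600) 60) (PySem.Int.mod t 60)) 3 = 0
    · simp only [hc, if_pos]
    · simp only [hc, if_false]
      simp
  · rw [dif_neg h, if_neg h]

theorem loopLeA_aux (e : Int) : ∀ k : Nat, ∀ t count : Int, e + 1 - t ≤ (k : Int) →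
    loopLeA t e count = count + (if t ≤ e then prefixG (e + 1) - prefixG t else 0) := by
  intro k
  induction k with
  | zero =>
    intro t count hk
    have h : ¬ t ≤ e := by omega
    rw [loopLeA_unfold, if_neg h, if_neg h]
    omega
  | succ k ih =>
    intro t count hk
    by_cases h : t ≤ e
    · rw [loopLeA_unfold, if_pos h, if_pos h, ih (t + 1) (count + chi t) (by omega)]
      have hstep := prefixG_step t
      by_cases h2 : t + 1 ≤ e
      · rw [if_pos h2]
        omega
      · rw [if_neg h2]
        have ht : e + 1 = t + 1 := by omega
        rw [ht]
        omega
    · rw [loopLeA_unfold, if_neg h, if_neg h]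
      omega

theorem loopLeA_eq (e t count : Int) :
    loopLeA t e count = count + (if t ≤ e then prefixG (e + 1) - prefixG t else 0) := by
  by_cases hle : t ≤ e
  · exact loopLeA_aux e (e + 1 - t).toNat t count (by omega)
  · exact loopLeA_aux e 0 t count (by omega)

theorem loopLtA_aux : ∀ k : Nat, ∀ t count : Int, 24 * 3600 - t ≤ (k : Int) →
    loopLtA t count = count + (if t < 24 * 3600 then prefixG (24 * 3600) - prefixG t else 0) := by
  intro k
  induction k with
  | zero =>
    intro t count hk
    have h : ¬ t < 24 * 3600 := by omega
    rw [loopLtA_unfold, if_neg h, if_neg h]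
    omega
  | succ k ih =>
    intro t count hk
    by_cases h : t < 24 * 3600
    · rw [loopLtA_unfold, if_pos h, if_pos h, ih (t + 1) (count + chi t) (by omega)]
      have hstep := prefixG_step t
      by_cases h2 : t + 1 < 24 * 3600
      · rw [if_pos h2]
        omega
      · rw [if_neg h2]
        have ht : (24 : Int) * 3600 = t + 1 := by omega
        rw [ht]
        omega
    · rw [loopLtA_unfold, if_neg h, if_neg h]
      omega

theorem loopLtA_eq (t count : Int) :
    loopLtA t count = count + (if t < 24 * 3600 then prefixG (24 * 3600) - prefixG t else 0) := by
  by_cases hlt : t < 24 * 3600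
  · exact loopLtA_aux (24 * 3600 - t).toNat t count (by omega)
  · exact loopLtA_aux 0 t count (by omega)

-- ===== VERDICT (by name: the statement is the Claim_ definition above) =====
theorem count_div3_spec : Claim_equal_count_div3 := by
  intro start end_ _
  unfold Spec_count_div3 count_div3 count_div3_alt cntRange
  have h0 : prefixG 0 = 0 := by decide
  by_cases h : start ≤ end_
  · rw [if_pos h, if_pos h, loopLeA_eq]
    split_ifs <;> omega
  · rw [if_neg h, if_neg h, loopLeA_eq, loopLtA_eq]
    split_ifs <;> omega
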